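-- pv_equiv track=rewrite | github.com/tanayag/istari | istari/signals/navigation.py | _count_back_navigation
-- ===== SOURCE A (Python) =====
-- from typing import List, Dict, Any, Set
--
-- def _count_back_navigation(page_sequence: List[str]) -> int:
--     """Count back navigation events."""
--     if len(page_sequence) < 2:
--         return 0
--
--     back_nav = 0
--     for i in range(1, len(page_sequence)):
--         # Simple heuristic: if we see a page we've seen before recently
--         current_page = page_sequence[i]
--         recent_pages = set(page_sequence[max(0, i-3):i])
--
--         if current_page in recent_pages:
--             back_nav += 1
--
--     return back_nav
-- ===== SOURCE B (Python) =====
-- def _count_back_navigation(page_sequence):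
--     """Count back navigation events (last-occurrence index table instead of a window set)."""
--     back_nav = 0
--     last_seen = {}
--     for i, page in enumerate(page_sequence):
--         j = last_seen.get(page)
--         if j is not None and i - j <= 3:
--             back_nav += 1
--         last_seen[page] = i
--     return back_nav
-- ===== Notes on version B (the rewrite author's own statement) =====
-- stated objective: faster
-- what changed: Replaced the per-iteration slice+set rebuild of the 3-page window by a single persistent last-occurrence dict with a distance check (i - last_seen[page] <= 3), updated every step.
import Mathlib
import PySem

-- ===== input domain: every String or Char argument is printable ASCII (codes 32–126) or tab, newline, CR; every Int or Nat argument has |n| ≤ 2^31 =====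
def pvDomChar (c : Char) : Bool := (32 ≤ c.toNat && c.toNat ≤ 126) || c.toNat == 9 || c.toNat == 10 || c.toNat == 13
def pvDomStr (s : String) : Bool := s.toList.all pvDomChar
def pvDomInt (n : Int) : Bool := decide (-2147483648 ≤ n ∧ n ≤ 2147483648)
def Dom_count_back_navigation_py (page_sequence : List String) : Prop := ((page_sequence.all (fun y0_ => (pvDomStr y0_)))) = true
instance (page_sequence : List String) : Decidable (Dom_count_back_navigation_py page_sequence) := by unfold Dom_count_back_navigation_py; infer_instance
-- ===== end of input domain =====

-- B replaces A's per-step window-set rebuild by one last-occurrence dict with a distance check (faster by a constant factor).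

-- ===== PORT A =====
-- loop body of A's 'for i in range(1, len(page_sequence))'
def cbnStepA (page_sequence : List String) (back_nav : Int) (i : Int) : Int :=
  let current_page := PySem.List.pyGetD page_sequence i ""
  let recent_pages : PySem.Set String :=
    PySem.Set.ofList (PySem.List.slice page_sequence (some (max 0 (i - 3))) (some i))
  if PySem.Set.contains recent_pages current_page then back_nav + 1 else back_nav

def count_back_navigation_py (page_sequence : List String) : Int :=
  if (page_sequence.length : Int) < 2 then 0
  else (PySem.List.pyRange 1 (page_sequence.length : Int) 1).foldl (cbnStepA page_sequence) 0

-- ===== PORT B =====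
-- loop body of B's 'for i, page in enumerate(page_sequence)'
def cbnStepB (st : Int × PySem.Dict String Int) (p : Int × String) : Int × PySem.Dict String Int :=
  let j? := st.2.get? p.2
  let back_nav :=
    match j? with
    | some j => if p.1 - j ≤ 3 then st.1 + 1 else st.1
    | none => st.1
  (back_nav, st.2.insert p.2 p.1)

def count_back_navigation_py_alt (page_sequence : List String) : Int :=
  ((PySem.List.enumerate page_sequence 0).foldl cbnStepB (0, PySem.Dict.empty)).1

-- ===== PRECONDITION & SPEC =====
def Spec_count_back_navigation_py (page_sequence : List String) (out : Int) : Prop := out = count_back_navigation_py_alt page_sequence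
instance (page_sequence : List String) (out : Int) : Decidable (Spec_count_back_navigation_py page_sequence out) := by unfold Spec_count_back_navigation_py; infer_instance

-- ===== CLAIM (what is proved, stated in full; the proofs are below) =====
def Claim_equal_count_back_navigation_py : Prop := ∀ (page_sequence : List String), Dom_count_back_navigation_py page_sequence → Spec_count_back_navigation_py page_sequence (count_back_navigation_py page_sequence)

-- ===== LEMMAS AND PROOFS =====

-- last occurrence of p among the first m positions of ps (greatest j < m with ps[j] = p)
def lastF (ps : List String) (m : Nat) (p : String) : Option Nat :=
  (List.range m).reverse.find? (fun j => ps.getD j "" == p)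

theorem lastF_zero (ps : List String) (p : String) : lastF ps 0 p = none := rfl

theorem lastF_succ (ps : List String) (m : Nat) (p : String) :
    lastF ps (m + 1) p = if ps.getD m "" = p then some m else lastF ps m p := by
  unfold lastF
  rw [List.range_succ, List.reverse_append]
  simp only [List.reverse_singleton, List.singleton_append, List.find?_cons]
  by_cases hp : ps.getD m "" = p
  · rw [if_pos hp, show (ps.getD m "" == p) = true from beq_iff_eq.mpr hp]
  · rw [if_neg hp, show (ps.getD m "" == p) = false from beq_eq_false_iff_ne.mpr hp]

theorem lastF_some (ps : List String) (m : Nat) (p : String) (l : Nat)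
    (h : lastF ps m p = some l) :
    l < m ∧ ps.getD l "" = p ∧ ∀ j, l < j → j < m → ps.getD j "" ≠ p := by
  induction m with
  | zero => simp [lastF_zero] at h
  | succ m ih =>
    rw [lastF_succ] at h
    split_ifs at h with hp
    · obtain rfl : m = l := by injection h
      exact ⟨by omega, hp, fun j h1 h2 => by omega⟩
    · obtain ⟨h1, h2, h3⟩ := ih h
      refine ⟨by omega, h2, fun j hj1 hj2 => ?_⟩
      rcases Nat.lt_succ_iff_lt_or_eq.mp hj2 with h | rfl
      · exact h3 j hj1 h
      · exact hp

theorem lastF_none (ps : List String) (m : Nat) (p : String)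
    (h : lastF ps m p = none) : ∀ j, j < m → ps.getD j "" ≠ p := by
  induction m with
  | zero => omega
  | succ m ih =>
    rw [lastF_succ] at h
    split_ifs at h with hp
    intro j hj
    rcases Nat.lt_succ_iff_lt_or_eq.mp hj with h' | rfl
    · exact ih h j h'
    · exact hp

-- membership in the 3-window iff the last occurrence is within distance 3
theorem window_iff (ps : List String) (m : Nat) (cur : String) :
    (∃ j, m - 3 ≤ j ∧ j < m ∧ ps.getD j "" = cur) ↔
      (∃ l, lastF ps m cur = some l ∧ m - l ≤ 3) := by
  constructor
  · rintro ⟨j, hj1, hj2, hj3⟩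
    cases hl : lastF ps m cur with
    | none => exact absurd hj3 (lastF_none ps m cur hl j hj2)
    | some l =>
      obtain ⟨h1, h2, h3⟩ := lastF_some ps m cur l hl
      refine ⟨l, rfl, ?_⟩
      by_cases hjl : j ≤ l
      · omega
      · exact absurd hj3 (h3 j (by omega) hj2)
  · rintro ⟨l, hl, hd⟩
    obtain ⟨h1, h2, h3⟩ := lastF_some ps m cur l hl
    exact ⟨l, by omega, h1, h2⟩

-- the invariant carried by B's dict
def DInv (ps : List String) (m : Nat) (d : PySem.Dict String Int) : Prop :=
  ∀ p, d.get? p = (lastF ps m p).map (fun l => (l : Int))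

theorem mem_window_iff (ps : List String) (m : Nat) (hm : m ≤ ps.length) (cur : String) :
    cur ∈ PySem.List.slice ps (some (max 0 ((m : Int) - 3))) (some (m : Int)) ↔
      ∃ j, m - 3 ≤ j ∧ j < m ∧ ps.getD j "" = cur := by
  have ha : max 0 ((m : Int) - 3) = ((m - 3 : Nat) : Int) := by omega
  rw [ha, PySem.List.slice_natCast]
  constructor
  · intro h
    obtain ⟨k, hk, hget⟩ := List.mem_iff_getElem.mp h
    have hklt : k < m - (m - 3) := by
      simp [List.length_take, List.length_drop] at hk; omega
    refine ⟨m - 3 + k, by omega, by omega, ?_⟩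
    have hsl : m - 3 + k < ps.length := by omega
    rw [List.getD_eq_getElem _ _ hsl]
    simpa [List.getElem_take, List.getElem_drop] using hget
  · rintro ⟨j, hj1, hj2, hj3⟩
    have hjl : j < ps.length := by omega
    rw [List.getD_eq_getElem _ _ hjl] at hj3
    apply List.mem_iff_getElem.mpr
    refine ⟨j - (m - 3), by simp [List.length_take, List.length_drop]; omega, ?_⟩
    have hidx : m - 3 + (j - (m - 3)) = j := by omega
    simpa [List.getElem_take, List.getElem_drop, hidx] using hj3

-- one B-step preserves the invariant and matches A's step
theorem loop_inv (ps : List String) :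
    ∀ m : Nat, m ≤ ps.length →
      ((PySem.List.enumerate (ps.take m) 0).foldl cbnStepB (0, PySem.Dict.empty)).1 =
        (PySem.List.pyRange 1 (m : Int) 1).foldl (cbnStepA ps) 0 ∧
      DInv ps m ((PySem.List.enumerate (ps.take m) 0).foldl cbnStepB (0, PySem.Dict.empty)).2 := by
  intro m
  induction m with
  | zero =>
    intro _
    constructor
    · simp [PySem.List.pyRange_one_eq_nil]
    · intro p; simp [lastF_zero, PySem.Dict.get?_empty]
  | succ m ih =>
    intro hm
    obtain ⟨ihA, ihD⟩ := ih (by omega)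
    have hmlt : m < ps.length := by omega
    have htake : ps.take (m + 1) = ps.take m ++ [ps.getD m ""] := by
      rw [List.getD_eq_getElem _ _ hmlt]
      exact List.take_succ_eq_append_getElem hmlt
    set cur := ps.getD m "" with hcur
    set st := (PySem.List.enumerate (ps.take m) 0).foldl cbnStepB (0, PySem.Dict.empty) with hst
    have henum : PySem.List.enumerate (ps.take (m+1)) 0 =
        PySem.List.enumerate (ps.take m) 0 ++ [((m : Int), cur)] := by
      rw [htake, PySem.List.enumerate_append]
      simp [PySem.List.enumerate, List.length_take, Nat.min_eq_left (le_of_lt hmlt)]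
    have hfold : (PySem.List.enumerate (ps.take (m+1)) 0).foldl cbnStepB (0, PySem.Dict.empty) =
        cbnStepB st ((m : Int), cur) := by
      rw [henum, List.foldl_append]; rfl
    have hget : PySem.List.pyGetD ps (m : Int) "" = cur := by
      simp [PySem.List.pyGetD_natCast, hcur]
    -- A's step written through the last-occurrence characterisation
    have hA : ∀ acc : Int, cbnStepA ps acc (m : Int) =
        if (∃ l, lastF ps m cur = some l ∧ m - l ≤ 3) then acc + 1 else acc := by
      intro acc
      unfold cbnStepA
      simp only [hget]
      by_cases hmem : cur ∈ PySem.List.slice ps (some (max 0 ((m : Int) - 3))) (some (m : Int))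
      · have hb : PySem.Set.contains
            (PySem.Set.ofList (PySem.List.slice ps (some (max 0 ((m : Int) - 3))) (some (m : Int)))) cur = true := by
          simp [PySem.Set.contains, PySem.Set.mem_ofList]
          exact hmem
        rw [hb]
        rw [if_pos rfl,
          if_pos ((window_iff ps m cur).mp ((mem_window_iff ps m (by omega) cur).mp hmem))]
      · have hb : PySem.Set.contains
            (PySem.Set.ofList (PySem.List.slice ps (some (max 0 ((m : Int) - 3))) (some (m : Int)))) cur = false := by
          simp [PySem.Set.contains, PySem.Set.mem_ofList]
          exact hmem
        rw [hb]
        rw [if_neg (by decide),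
          if_neg (fun h => hmem ((mem_window_iff ps m (by omega) cur).mpr ((window_iff ps m cur).mpr h)))]
    -- B's condition at this step equals A's extended fold
    have hcond : (match st.2.get? cur with
        | some j => if (m : Int) - j ≤ 3 then st.1 + 1 else st.1
        | none => st.1) =
        (PySem.List.pyRange 1 ((m : Int) + 1) 1).foldl (cbnStepA ps) 0 := by
      by_cases hm0 : m = 0
      · subst hm0
        have hnone : st.2.get? cur = none := by rw [ihD cur, lastF_zero]; rfl
        rw [hnone, ihA]
        rw [show ((0 : Nat) : Int) + 1 = 1 by norm_num,
          PySem.List.pyRange_one_eq_nil (le_refl (1 : Int)),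
          PySem.List.pyRange_one_eq_nil (by norm_num : ((0:Nat) : Int) ≤ 1)]
      · have h1m : (1 : Int) ≤ (m : Int) := by omega
        rw [PySem.List.pyRange_one_succ_right h1m, List.foldl_append,
          List.foldl_cons, List.foldl_nil, ← ihA, hA st.1, ihD cur]
        cases hl : lastF ps m cur with
        | none =>
          rw [if_neg (by rintro ⟨l', hc, -⟩; cases hc)]
          rfl
        | some l =>
          obtain ⟨hl1, _, _⟩ := lastF_some ps m cur l hl
          show (if (m : Int) - (l : Int) ≤ 3 then st.1 + 1 else st.1) = _
          split_ifs with h1 h2 h2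
          · rfl
          · exact absurd ⟨l, rfl, by omega⟩ h2
          · obtain ⟨l', hl', hd⟩ := h2
            obtain rfl : l' = l := by injection hl' with h; exact h.symm
            omega
          · rfl
    constructor
    · rw [hfold]
      show (match st.2.get? cur with
        | some j => if (m : Int) - j ≤ 3 then st.1 + 1 else st.1
        | none => st.1) = _
      rw [show ((m + 1 : Nat) : Int) = (m : Int) + 1 by push_cast; ring]
      exact hcond
    · intro p
      rw [hfold]
      show (st.2.insert cur (m : Int)).get? p = _
      rw [lastF_succ, ← hcur]
      by_cases hp : p = cur
      · subst hp
        rw [PySem.Dict.get?_insert_self]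
        simp
      · rw [PySem.Dict.get?_insert_of_ne _ _ hp, ihD p,
          if_neg (fun h => hp h.symm)]

-- ===== VERDICT (by name: the statement is the Claim_ definition above) =====
theorem count_back_navigation_py_spec : Claim_equal_count_back_navigation_py := by
  intro ps _
  unfold Spec_count_back_navigation_py count_back_navigation_py count_back_navigation_py_alt
  have h := (loop_inv ps ps.length (le_refl _)).1
  rw [List.take_length] at h
  rw [h]
  split_ifs with hlen
  · rw [PySem.List.pyRange_one_eq_nil (by omega)]
    rfl
  · rfl
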